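-- pv_equiv track=rewrite | github.com/danchendrickson/RMG_NDE_Disssertation | MLphase2/Code/RMG_NDE_Disssertation/MLphase2/TAD_makeManyCSV.py | split_list_by_ones
-- ===== SOURCE A (Python) =====
-- def split_list_by_ones(original_list, ones_list):
--     # Created with Bing AI support
--     #  1st request: "python split list into chunks based on value"
--     #  2nd request: "I want to split the list based on the values in a second list.  Second list is all 1s and 0s.  I want all 0s removed, and each set of consequtive ones as its own item"
--     #  3rd request: "That is close.  Here is an example of the two lists, and what I would want returned: original_list = [1, 2, 3, 8, 7, 4, 5, 6, 4, 7, 8, 9]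
--     #                ones_list =     [1, 1, 1, 1, 0, 1, 1, 1, 0, 0, 1, 1]
--     #                return: [[1, 2, 3, 8], [4, 5, 6], [8,9]]"
--     #
--     #This is the function that was created and seems to work on the short lists, goin to use fo rlong lists
--
--     result_sublists = []
--     sublist = []
--
--     for val, is_one in zip(original_list, ones_list):
--         if is_one:
--             sublist.append(val)
--         elif sublist:
--             result_sublists.append(sublist)
--             sublist = []
--
--     # Add the last sublist (if any)
--     if sublist:
--         result_sublists.append(sublist)
--
--     return result_sublists
-- ===== SOURCE B (Python) =====
-- def split_list_by_ones(original_list, ones_list):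
--     # Run-scanner over the truncated mask: find each maximal run of equal
--     # truthiness with two indices and slice original_list once per truthy run.
--     n = min(len(original_list), len(ones_list))
--     result = []
--     i = 0
--     while i < n:
--         truthy = bool(ones_list[i])
--         j = i + 1
--         while j < n and bool(ones_list[j]) == truthy:
--             j += 1
--         if truthy:
--             result.append(original_list[i:j])
--         i = j
--     return result
-- ===== Notes on version B (the rewrite author's own statement) =====
-- stated objective: alternative
-- what changed: A walks zip(original, ones) element by element growing a sublist accumulator; B scans the truncated mask with two indices to find each maximal run of equal truthiness and emits one slice original_list[i:j] per truthy run.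
import Mathlib
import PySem

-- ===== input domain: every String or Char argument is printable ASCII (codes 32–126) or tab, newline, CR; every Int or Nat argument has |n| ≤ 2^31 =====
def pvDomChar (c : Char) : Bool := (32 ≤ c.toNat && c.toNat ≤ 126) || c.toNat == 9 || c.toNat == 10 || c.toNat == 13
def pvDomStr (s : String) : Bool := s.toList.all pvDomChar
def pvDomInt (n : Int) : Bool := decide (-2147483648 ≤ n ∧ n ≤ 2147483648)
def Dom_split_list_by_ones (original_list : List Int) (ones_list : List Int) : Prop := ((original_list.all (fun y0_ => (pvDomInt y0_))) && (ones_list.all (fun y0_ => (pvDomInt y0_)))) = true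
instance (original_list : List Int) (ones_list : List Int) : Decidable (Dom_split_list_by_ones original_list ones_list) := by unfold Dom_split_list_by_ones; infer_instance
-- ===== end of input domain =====

-- B replaces A's element-by-element accumulator loop by a two-index run scanner
-- over the truncated mask that emits one slice per truthy run (objective: alternative).

-- ===== PORT A =====
-- the zip loop with its two accumulators (result_sublists, sublist)
def loopA : List (Int × Int) → List (List Int) → List Int → List (List Int)
  | [], res, sub => if sub.isEmpty then res else res ++ [sub]
  | (v, m) :: rest, res, sub =>
      if m ≠ 0 then loopA rest res (sub ++ [v])
      else if sub.isEmpty then loopA rest res sub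
      else loopA rest (res ++ [sub]) []

def split_list_by_ones (original_list : List Int) (ones_list : List Int) : List (List Int) :=
  loopA (original_list.zip ones_list) [] []

-- ===== PORT B =====
-- inner while: j = i+1; while j < n and bool(ones_list[j]) == truthy: j += 1
-- (ones_list[j] is read with j < n ≤ len ones_list, so getD is exact here)
def altInner (ones : List Int) (N : Nat) (t : Bool) (j : Nat) : Nat :=
  if h : j < N ∧ decide (ones.getD j 0 ≠ 0) = t then altInner ones N t (j + 1) else j
termination_by N - j
decreasing_by omega

theorem le_altInner (ones : List Int) (N : Nat) (t : Bool) (j : Nat) :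
    j ≤ altInner ones N t j := by
  fun_induction altInner with
  | case1 j _ ih => omega
  | case2 j _ => omega

-- outer while over run boundaries
def altOuter (original ones : List Int) (N : Nat) (i : Nat) (acc : List (List Int)) :
    List (List Int) :=
  if h : i < N then
    let t := decide (ones.getD i 0 ≠ 0)
    let j := altInner ones N t (i + 1)
    altOuter original ones N j
      (if t then acc ++ [PySem.List.slice original (some (i : Int)) (some (j : Int))] else acc)
  else acc
termination_by N - i
decreasing_by
  have := le_altInner ones N (decide (ones.getD i 0 ≠ 0)) (i + 1)
  omega

def split_list_by_ones_alt (original_list : List Int) (ones_list : List Int) : List (List Int) :=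
  altOuter original_list ones_list (min original_list.length ones_list.length) 0 []

-- ===== PRECONDITION & SPEC =====
def Spec_split_list_by_ones (original_list : List Int) (ones_list : List Int) (out : List (List Int)) : Prop := out = split_list_by_ones_alt original_list ones_list
instance (original_list : List Int) (ones_list : List Int) (out : List (List Int)) : Decidable (Spec_split_list_by_ones original_list ones_list out) := by unfold Spec_split_list_by_ones; infer_instance

-- ===== CLAIM (what is proved, stated in full; the proofs are below) =====
def Claim_equal_split_list_by_ones : Prop := ∀ (original_list : List Int) (ones_list : List Int), Dom_split_list_by_ones original_list ones_list → Spec_split_list_by_ones original_list ones_list (split_list_by_ones original_list ones_list)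

-- ===== LEMMAS AND PROOFS =====

-- step equations for the ports
theorem loopA_nil (res : List (List Int)) (sub : List Int) :
    loopA [] res sub = if sub.isEmpty then res else res ++ [sub] := rfl

theorem loopA_cons_true {m : Int} (hm : m ≠ 0) (v : Int) (rest : List (Int × Int))
    (res : List (List Int)) (sub : List Int) :
    loopA ((v, m) :: rest) res sub = loopA rest res (sub ++ [v]) := by
  simp [loopA, hm]

theorem loopA_cons_false_nil {m : Int} (hm : m = 0) (v : Int) (rest : List (Int × Int))
    (res : List (List Int)) :
    loopA ((v, m) :: rest) res [] = loopA rest res [] := by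
  simp [loopA, hm]

theorem loopA_cons_false {m : Int} (hm : m = 0) (v : Int) (rest : List (Int × Int))
    (res : List (List Int)) {sub : List Int} (hs : sub ≠ []) :
    loopA ((v, m) :: rest) res sub = loopA rest (res ++ [sub]) [] := by
  simp [loopA, hm, hs]

theorem altOuter_stop {o n : List Int} {N i : Nat} (h : ¬ i < N) (acc : List (List Int)) :
    altOuter o n N i acc = acc := by
  rw [altOuter]; exact dif_neg h

theorem altOuter_step {o n : List Int} {N i : Nat} (h : i < N) (acc : List (List Int)) :
    altOuter o n N i acc
      = altOuter o n N (altInner n N (decide (n.getD i 0 ≠ 0)) (i + 1))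
          (if decide (n.getD i 0 ≠ 0) then
            acc ++ [PySem.List.slice o (some (i : Int))
              (some ((altInner n N (decide (n.getD i 0 ≠ 0)) (i + 1) : Nat) : Int))]
          else acc) := by
  rw [altOuter, dif_pos h]

theorem altInner_le (ones : List Int) (N : Nat) (t : Bool) (j : Nat) (hj : j ≤ N) :
    altInner ones N t j ≤ N := by
  fun_induction altInner with
  | case1 j h ih => exact ih (by omega)
  | case2 j h => exact hj

-- at exit, either we hit N or the truthiness changed
theorem altInner_exit (ones : List Int) (N : Nat) (t : Bool) (j : Nat)
    (hlt : altInner ones N t j < N) :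
    decide (ones.getD (altInner ones N t j) 0 ≠ 0) ≠ t := by
  fun_induction altInner with
  | case1 j h ih => exact ih hlt
  | case2 j h =>
      intro hc
      exact h ⟨hlt, hc⟩

-- consuming a truthy run appends the corresponding original elements to sublist
theorem inner_true (o n : List Int) (N : Nat) (hN : N = min o.length n.length)
    (j : Nat) (res : List (List Int)) (sub : List Int) :
    loopA ((o.zip n).drop j) res sub
      = loopA ((o.zip n).drop (altInner n N true j)) res
          (sub ++ (o.drop j).take (altInner n N true j - j)) := by
  fun_induction altInner n N true j generalizing res sub with
  | case1 j h ih =>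
      have hj : j < (o.zip n).length := by rw [List.length_zip]; omega
      have hjo : j < o.length := by omega
      have hjn : j < n.length := by omega
      have hget : (o.zip n)[j] = (o[j], n[j]) := List.getElem_zip ..
      have hm : n[j] ≠ 0 := by
        have := h.2
        simp [List.getD_eq_getElem?_getD, List.getElem?_eq_getElem hjn] at this
        exact this
      have hJ : j + 1 ≤ altInner n N true (j + 1) := le_altInner ..
      rw [List.drop_eq_getElem_cons hj, hget, loopA_cons_true hm, ih]
      congr 1
      rw [List.append_assoc]
      congr 1
      rw [List.drop_eq_getElem_cons hjo]
      have hx : altInner n N true (j + 1) - j = (altInner n N true (j + 1) - (j + 1)) + 1 := by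
        omega
      rw [hx, List.take_succ_cons]
      rfl
  | case2 j h =>
      simp
-- consuming a falsy run with an empty sublist changes nothing
theorem inner_false (o n : List Int) (N : Nat) (hN : N = min o.length n.length)
    (j : Nat) (res : List (List Int)) :
    loopA ((o.zip n).drop j) res []
      = loopA ((o.zip n).drop (altInner n N false j)) res [] := by
  fun_induction altInner n N false j generalizing res with
  | case1 j h ih =>
      have hj : j < (o.zip n).length := by rw [List.length_zip]; omega
      have hjn : j < n.length := by omega
      have hget : (o.zip n)[j] = (o[j], n[j]) := List.getElem_zip ..
      have hm : n[j] = 0 := by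
        have := h.2
        simp [List.getD_eq_getElem?_getD, List.getElem?_eq_getElem hjn] at this
        exact this
      rw [List.drop_eq_getElem_cons hj, hget, loopA_cons_false_nil hm, ih]
  | case2 j h =>
      rfl

theorem outer (o n : List Int) (N : Nat) (hN : N = min o.length n.length) :
    ∀ k i res, N - i ≤ k → i ≤ N →
      loopA ((o.zip n).drop i) res [] = altOuter o n N i res := by
  intro k
  induction k with
  | zero =>
      intro i res hk hle
      have hi : i = N := by omega
      subst hi
      rw [List.drop_of_length_le (by rw [List.length_zip]; omega), loopA_nil,
        altOuter_stop (by omega)]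
      rfl
  | succ k ih =>
      intro i res hk hle
      by_cases hlt : i < N
      · have hjo : i < o.length := by omega
        have hjn : i < n.length := by omega
        have hzi : i < (o.zip n).length := by rw [List.length_zip]; omega
        have hget : (o.zip n)[i] = (o[i], n[i]) := List.getElem_zip ..
        have hgd : n.getD i 0 = n[i] := by
          simp [List.getD_eq_getElem?_getD, List.getElem?_eq_getElem hjn]
        by_cases ht : n[i] ≠ 0
        · -- truthy run starting at i
          have hdt : decide (n.getD i 0 ≠ 0) = true := by rw [hgd]; simp [ht]
          set J := altInner n N true (i + 1) with hJdef
          have hJ1 : i + 1 ≤ J := le_altInner ..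
          have hJN : J ≤ N := altInner_le n N true (i + 1) (by omega)
          set sub := (o.drop i).take (J - i) with hsubdef
          have hsub : [o[i]] ++ (o.drop (i + 1)).take (J - (i + 1)) = sub := by
            rw [hsubdef, List.drop_eq_getElem_cons hjo]
            have : J - i = (J - (i + 1)) + 1 := by omega
            rw [this, List.take_succ_cons]
            rfl
          have hslice : PySem.List.slice o (some (i : Int)) (some (J : Int)) = sub :=
            PySem.List.slice_natCast ..
          have hsubne : sub ≠ [] := by
            rw [hsubdef, List.drop_eq_getElem_cons hjo]
            have : J - i = (J - (i + 1)) + 1 := by omega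
            rw [this, List.take_succ_cons]
            simp
          rw [List.drop_eq_getElem_cons hzi, hget, loopA_cons_true ht, List.nil_append,
            inner_true o n N hN (i + 1) res [o[i]], hsub, ← hJdef]
          -- fold the pending sublist into the accumulator at the run boundary
          have h2 : loopA ((o.zip n).drop J) res sub
              = loopA ((o.zip n).drop J) (res ++ [sub]) [] := by
            rcases Nat.eq_or_lt_of_le hJN with hEq | hJlt
            · rw [List.drop_of_length_le (by rw [List.length_zip]; omega), loopA_nil,
                loopA_nil]
              simp [hsubne]
            · have hJz : J < (o.zip n).length := by rw [List.length_zip]; omega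
              have hJn : J < n.length := by omega
              have hgetJ : (o.zip n)[J] = (o[J], n[J]) := List.getElem_zip ..
              have hmJ : n[J] = 0 := by
                have := altInner_exit n N true (i + 1) (by rw [← hJdef]; exact hJlt)
                rw [← hJdef] at this
                simp [List.getD_eq_getElem?_getD, List.getElem?_eq_getElem hJn] at this
                exact this
              rw [List.drop_eq_getElem_cons hJz, hgetJ, loopA_cons_false hmJ _ _ _ hsubne,
                loopA_cons_false_nil hmJ]
          rw [h2, ih J _ (by omega) hJN, altOuter_step hlt, hdt]
          simp only [if_true, hslice, ← hJdef]
        · -- falsy run starting at i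
          rw [not_not] at ht
          have hdt : decide (n.getD i 0 ≠ 0) = false := by rw [hgd]; simp [ht]
          set J := altInner n N false (i + 1) with hJdef
          have hJ1 : i + 1 ≤ J := le_altInner ..
          have hJN : J ≤ N := altInner_le n N false (i + 1) (by omega)
          rw [List.drop_eq_getElem_cons hzi, hget, loopA_cons_false_nil ht,
            inner_false o n N hN (i + 1) res, ← hJdef, ih J _ (by omega) hJN,
            altOuter_step hlt, hdt]
          simp only [Bool.false_eq_true, if_false, ← hJdef]
      · rw [List.drop_of_length_le (by rw [List.length_zip]; omega), loopA_nil,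
          altOuter_stop hlt]
        rfl

-- ===== VERDICT (by name: the statement is the Claim_ definition above) =====
theorem split_list_by_ones_spec : Claim_equal_split_list_by_ones := by
  intro o n _
  unfold Spec_split_list_by_ones split_list_by_ones split_list_by_ones_alt
  exact outer o n (min o.length n.length) rfl (min o.length n.length) 0 [] (by omega) (by omega)
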